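-- pv_equiv track=rewrite | github.com/ahaiceid/adventofcode.com | 2022/day/14/solver.py | decode_vertex_lists
-- ===== SOURCE A (Python) =====
-- from functools import reduce
--
-- def decode_vertex_lists(input_data, offset=0):
--     x_max = 0
--     y_max = 0
--     vertex_lists = []
--     for line in input_data:
--         line_vertices = list(map(
--             lambda x:(x[0]+offset,x[1]),
--             [[int(v) for v in word.split(',')] for word in line.split(' -> ')]))
--         line_x_max, line_y_max = reduce(lambda x,y: (max(x[0],y[0]),max(x[1],y[1])), line_vertices)
--         vertex_lists.append(line_vertices)
--         x_max = max(x_max,line_x_max)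
--         y_max = max(y_max,line_y_max)
--     return x_max, y_max, vertex_lists
-- ===== SOURCE B (Python) =====
-- def decode_vertex_lists(input_data, offset=0):
--     vertex_lists = [
--         [(int(word.split(',')[0]) + offset, int(word.split(',')[1]))
--          for word in line.split(' -> ')]
--         for line in input_data]
--     flat = [v for line in vertex_lists for v in line]
--     x_max = max([0] + [v[0] for v in flat])
--     y_max = max([0] + [v[1] for v in flat])
--     return x_max, y_max, vertex_lists
-- ===== Notes on version B (the rewrite author's own statement) =====
-- stated objective: simpler
-- what changed: A interleaves parsing with a per-line pairwise reduce and two running-max accumulators; B first parses every line into its vertex list, then computes x_max and y_max in one flatten-and-max pass seeded with 0.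
import Mathlib
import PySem

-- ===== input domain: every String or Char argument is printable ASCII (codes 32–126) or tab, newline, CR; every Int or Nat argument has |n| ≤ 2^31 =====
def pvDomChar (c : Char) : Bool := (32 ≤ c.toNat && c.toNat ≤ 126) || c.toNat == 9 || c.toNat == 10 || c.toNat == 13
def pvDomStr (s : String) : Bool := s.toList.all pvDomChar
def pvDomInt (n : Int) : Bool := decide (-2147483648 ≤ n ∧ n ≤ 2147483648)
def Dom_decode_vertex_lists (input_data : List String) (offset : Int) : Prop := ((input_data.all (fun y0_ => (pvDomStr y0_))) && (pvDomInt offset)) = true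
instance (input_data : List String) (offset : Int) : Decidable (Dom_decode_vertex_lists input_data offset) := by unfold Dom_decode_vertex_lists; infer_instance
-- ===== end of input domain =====

-- B replaces A's interleaved per-line reduce-and-accumulate with a clean parse pass
-- followed by one flatten-and-max pass (objective: simpler; same asymptotic cost).

-- ===== PORT A =====
-- line.split(' -> ') / word.split(','); sep is a nonempty literal so split? is always some ([s] is a dead default)
def decode_vertex_lists (input_data : List String) (offset : Int) : Int × Int × (List (List (Int × Int))) :=
  input_data.foldl
    (fun (st : Int × Int × List (List (Int × Int))) line =>
      let nums : List (List Int) :=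
        ((PySem.Str.split? line " -> ").getD [line]).map
          (fun word => ((PySem.Str.split? word ",").getD [word]).map
            (fun v => (PySem.Int.ofStr? v).getD 0))       -- int(v); Pre_ guarantees some
      let line_vertices : List (Int × Int) :=
        nums.map (fun x => ((PySem.List.pyGet? x 0).getD 0 + offset,
                            (PySem.List.pyGet? x 1).getD 0))  -- x[0], x[1]; Pre_ guarantees in range
      let m : Int × Int :=
        match line_vertices with
        | [] => (0, 0)          -- dead guard: split? never yields an empty list, reduce always has a seed
        | h :: t => t.foldl (fun x y => (max x.1 y.1, max x.2 y.2)) h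
      (max st.1 m.1, max st.2.1 m.2, st.2.2 ++ [line_vertices]))
    (0, 0, [])

-- ===== PORT B =====
-- (int(word.split(',')[0]) + offset, int(word.split(',')[1])); defaults are dead on Pre_ inputs
def pvParseLine (offset : Int) (line : String) : List (Int × Int) :=
  ((PySem.Str.split? line " -> ").getD [line]).map (fun word =>
    ((PySem.Int.ofStr? ((PySem.List.pyGet? ((PySem.Str.split? word ",").getD [word]) 0).getD "")).getD 0 + offset,
     (PySem.Int.ofStr? ((PySem.List.pyGet? ((PySem.Str.split? word ",").getD [word]) 1).getD "")).getD 0))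

def decode_vertex_lists_alt (input_data : List String) (offset : Int) : Int × Int × (List (List (Int × Int))) :=
  let vertex_lists := input_data.map (pvParseLine offset)
  let flat := vertex_lists.flatMap (fun line => line)
  let x_max := (PySem.List.max? ((0 : Int) :: flat.map (fun v => v.1)) (fun y => y)).getD 0  -- max([0] + …)
  let y_max := (PySem.List.max? ((0 : Int) :: flat.map (fun v => v.2)) (fun y => y)).getD 0
  (x_max, y_max, vertex_lists)

-- ===== PRECONDITION & SPEC =====
-- Pre_ excludes exactly the inputs where the Python A raises: a word whose comma-split has
-- fewer than 2 pieces (IndexError) or contains a piece that is not a valid int literal (ValueError).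
def Pre_decode_vertex_lists (input_data : List String) (offset : Int) : Prop :=
  ∀ line ∈ input_data, ∀ word ∈ (PySem.Str.split? line " -> ").getD [line],
    2 ≤ ((PySem.Str.split? word ",").getD [word]).length ∧
    ∀ v ∈ (PySem.Str.split? word ",").getD [word], (PySem.Int.ofStr? v).isSome
instance (input_data : List String) (offset : Int) : Decidable (Pre_decode_vertex_lists input_data offset) := by unfold Pre_decode_vertex_lists; infer_instance
def pvWitness_decode_vertex_lists : List String × Int := (["0,0 -> 2,1", "-3,4"], 5)

def Spec_decode_vertex_lists (input_data : List String) (offset : Int) (out : Int × Int × (List (List (Int × Int)))) : Prop := out = decode_vertex_lists_alt input_data offset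
instance (input_data : List String) (offset : Int) (out : Int × Int × (List (List (Int × Int)))) : Decidable (Spec_decode_vertex_lists input_data offset out) := by unfold Spec_decode_vertex_lists; infer_instance

-- ===== CLAIM (what is proved, stated in full; the proofs are below) =====
def Claim_equal_decode_vertex_lists : Prop := ∀ (input_data : List String) (offset : Int), Dom_decode_vertex_lists input_data offset → Pre_decode_vertex_lists input_data offset → Spec_decode_vertex_lists input_data offset (decode_vertex_lists input_data offset)

-- ===== LEMMAS AND PROOFS =====

-- pyGet? commutes with map (unfolds the primitive; no library lemma fits this shape)
lemma pyGet?_map_own {α β : Type} (l : List α) (i : Int) (f : α → β) :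
    PySem.List.pyGet? (l.map f) i = (PySem.List.pyGet? l i).map f := by
  simp [PySem.List.pyGet?, PySem.List.pyIdx?]

-- A's per-line parse equals B's pvParseLine (vertex by vertex, on every input: both defaults agree)
lemma parse_eq (offset : Int) (line : String) :
    (((PySem.Str.split? line " -> ").getD [line]).map
      (fun word => ((PySem.Str.split? word ",").getD [word]).map
        (fun v => (PySem.Int.ofStr? v).getD 0))).map
      (fun x => ((PySem.List.pyGet? x 0).getD 0 + offset, (PySem.List.pyGet? x 1).getD 0))
    = pvParseLine offset line := by
  unfold pvParseLine
  rw [List.map_map]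
  refine List.map_congr_left (fun word _ => ?_)
  simp only [Function.comp]
  rw [pyGet?_map_own, pyGet?_map_own]
  cases h0 : PySem.List.pyGet? ((PySem.Str.split? word ",").getD [word]) 0 <;>
    cases h1 : PySem.List.pyGet? ((PySem.Str.split? word ",").getD [word]) 1 <;>
    simp [h0, h1] <;> decide

-- A's pairwise reduce projects to two running maxes
lemma reduce_proj (h : Int × Int) (t : List (Int × Int)) :
    t.foldl (fun x y => (max x.1 y.1, max x.2 y.2)) h
    = (List.foldl max h.1 (t.map (fun v => v.1)), List.foldl max h.2 (t.map (fun v => v.2))) := by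
  induction t generalizing h with
  | nil => rfl
  | cons y t ih => simp [ih]

lemma foldl_max_pull (l : List Int) (a b : Int) :
    List.foldl max (max a b) l = max a (List.foldl max b l) := by
  induction l generalizing b with
  | nil => rfl
  | cons c l ih => simp only [List.foldl_cons] at *; rw [max_assoc, ih]

-- A's loop body, named for the proof (the port keeps it inline)
def stepA (offset : Int) (st : Int × Int × List (List (Int × Int))) (line : String) :
    Int × Int × List (List (Int × Int)) :=
  let nums : List (List Int) :=
    ((PySem.Str.split? line " -> ").getD [line]).map
      (fun word => ((PySem.Str.split? word ",").getD [word]).map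
        (fun v => (PySem.Int.ofStr? v).getD 0))
  let line_vertices : List (Int × Int) :=
    nums.map (fun x => ((PySem.List.pyGet? x 0).getD 0 + offset,
                        (PySem.List.pyGet? x 1).getD 0))
  let m : Int × Int :=
    match line_vertices with
    | [] => (0, 0)
    | h :: t => t.foldl (fun x y => (max x.1 y.1, max x.2 y.2)) h
  (max st.1 m.1, max st.2.1 m.2, st.2.2 ++ [line_vertices])

lemma decode_eq_foldl (input_data : List String) (offset : Int) :
    decode_vertex_lists input_data offset = input_data.foldl (stepA offset) (0, 0, []) := rfl

-- one step of A, in terms of B's parse: running maxes absorb the per-line reduce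
lemma stepA_eq (offset : Int) (a b : Int) (acc : List (List (Int × Int))) (line : String)
    (ha : 0 ≤ a) (hb : 0 ≤ b) :
    stepA offset (a, b, acc) line
    = (List.foldl max a ((pvParseLine offset line).map (fun v => v.1)),
       List.foldl max b ((pvParseLine offset line).map (fun v => v.2)),
       acc ++ [pvParseLine offset line]) := by
  unfold stepA
  simp only [parse_eq]
  cases hlv : pvParseLine offset line with
  | nil => simp [max_eq_left ha, max_eq_left hb]
  | cons h t => simp [reduce_proj, ← foldl_max_pull]

-- the main invariant for A's fold
lemma main_inv (offset : Int) (lines : List String) :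
    ∀ (a b : Int) (acc : List (List (Int × Int))), 0 ≤ a → 0 ≤ b →
    lines.foldl (stepA offset) (a, b, acc)
    = (List.foldl max a ((lines.flatMap (pvParseLine offset)).map (fun v => v.1)),
       List.foldl max b ((lines.flatMap (pvParseLine offset)).map (fun v => v.2)),
       acc ++ lines.map (pvParseLine offset)) := by
  induction lines with
  | nil => intro a b acc _ _; simp
  | cons line rest ih =>
    intro a b acc ha hb
    rw [List.foldl_cons, stepA_eq offset a b acc line ha hb,
        ih _ _ _ (le_trans ha (PySem.List.le_foldl_max _ _).1)
                 (le_trans hb (PySem.List.le_foldl_max _ _).1)]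
    simp [List.flatMap_cons, List.map_append, List.foldl_append]

-- ===== VERDICT (by name: the statement is the Claim_ definition above) =====
theorem decode_vertex_lists_spec : Claim_equal_decode_vertex_lists := by
  intro input_data offset _ _
  unfold Spec_decode_vertex_lists decode_vertex_lists_alt
  rw [decode_eq_foldl, main_inv offset input_data 0 0 [] le_rfl le_rfl]
  simp only [PySem.List.max?_id_cons, Option.getD_some, List.nil_append]
  simp [List.flatMap_def, Function.comp_def]
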